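-- pv_equiv track=rewrite | github.com/DamianJFlett/COMP3506A1 | release/warmup/warmup.py | missing_odds
-- ===== SOURCE A (Python) =====
-- def missing_odds(inputs: list[int]) -> int:
--     """
--     @inputs@ is an unordered array of distinct integers.
--     If @a@ is the smallest number in the array and @b@ is the biggest,
--     return the sum of odd numbers in the interval [a, b] that are not present in @inputs@
--     If there are no such numbers, return 0.
--
--     Limitations:
--         "It works":
--             @inputs@ may contain up to 10'000 elements.
--             Each element is in range 0 <= inputs[i] <= 10^4
--         "Exhaustive":
--             @inputs@ may contain up to 300'000 elements.
--             Each element is in range 0 <= inputs[i] <= 10^6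
--         "Welcome to COMP3506":
--             @inputs@ may contain up to 5'000'000 elements.
--             Each element is in range 0 <= inputs[i] <= 10^16
--
--     Examples:
--     missing_odds([1, 2]) == 0
--     missing_odds([1, 3]) == 0
--     missing_odds([1, 4]) == 3
--     missing_odds([4, 1]) == 3
--     missing_odds([4, 1, 8, 5]) == 10    # 3 and 7 are missing
--     """
--     running_total = 0 #  sum of odd numbers present in (min, max)
--     min = inputs[0]
--     max = inputs[0]
--     for i in inputs:
--         if i < min:
--             min = i
--         if i > max:
--             max = i
--         if i % 2:
--             running_total += i
--     if min % 2:
--         running_total -= min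
--     if max % 2:
--         running_total -= max
--     size = _count_odds(min, max)
--     if min % 2 and max % 2:
--         return (size * (min + max)) // 2 - running_total
--     elif  not (min % 2 or max % 2):
--         return (size * (min + max)) // 2 - running_total
--     elif min % 2 and not (max % 2):
--         return (size * (min + max+1)) // 2 - running_total
--     else:
--         return (size * (min + max-1)) // 2 - running_total
--
-- def _count_odds(min: int, max: int) -> int:
--     """
--     Counts odd numbers in [a,b] exclusive
--     """
--     if min % 2 and max % 2:
--         return (max - min) // 2 - 1
--     else:
--         return (max - min) // 2
-- ===== SOURCE B (Python) =====
-- def missing_odds(inputs: list[int]) -> int: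
--     def g(n):
--         # sum of all odd numbers in [1, n] (0 when n <= 0), closed form
--         return ((n + 1) // 2) ** 2
--     xs = sorted(inputs)
--     # sum, over each adjacent pair in sorted order, of the odd numbers strictly between them
--     return sum(g(hi - 1) - g(lo) for lo, hi in zip(xs, xs[1:]))
-- ===== Notes on version B (the rewrite author's own statement) =====
-- stated objective: alternative
-- what changed: B sorts the inputs and accumulates, for each adjacent pair in sorted order, the closed-form sum of the odd numbers strictly between them, instead of A's single fold tracking (min, max, sum of odd elements) followed by a four-way parity case formula with helper _count_odds.
import Mathlib
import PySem

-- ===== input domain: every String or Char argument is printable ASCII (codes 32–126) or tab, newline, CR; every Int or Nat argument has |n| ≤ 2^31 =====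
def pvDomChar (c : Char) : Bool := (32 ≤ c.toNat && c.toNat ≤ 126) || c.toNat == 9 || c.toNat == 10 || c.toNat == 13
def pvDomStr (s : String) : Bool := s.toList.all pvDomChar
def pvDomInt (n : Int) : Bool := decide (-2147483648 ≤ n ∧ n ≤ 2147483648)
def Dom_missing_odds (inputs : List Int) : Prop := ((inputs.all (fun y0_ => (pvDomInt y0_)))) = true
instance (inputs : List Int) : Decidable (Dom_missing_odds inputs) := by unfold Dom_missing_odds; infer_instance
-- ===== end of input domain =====

-- B sorts the inputs and sums, over each adjacent pair of the sorted list, the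
-- closed-form sum of the odd numbers strictly between them (objective: alternative,
-- not faster). A raises IndexError on the empty list; Pre_ excludes it (B returns 0 there).

-- ===== PORT A =====
-- helper _count_odds: counts odd numbers in (min, max) exclusive
def count_odds (mn mx : Int) : Int :=
  if PySem.Int.mod mn 2 ≠ 0 ∧ PySem.Int.mod mx 2 ≠ 0 then
    PySem.Int.floordiv (mx - mn) 2 - 1
  else
    PySem.Int.floordiv (mx - mn) 2

def missing_odds (inputs : List Int) : Int :=
  match inputs with
  | [] => 0  -- Python raises IndexError here; excluded by Pre_
  | x0 :: _ =>
    let st := inputs.foldl (fun (s : Int × Int × Int) i =>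
      let mn := if i < s.1 then i else s.1
      let mx := if i > s.2.1 then i else s.2.1
      let rt := if PySem.Int.mod i 2 ≠ 0 then s.2.2 + i else s.2.2
      (mn, mx, rt)) (x0, x0, 0)
    let mn := st.1
    let mx := st.2.1
    let rt0 := st.2.2
    let rt1 := if PySem.Int.mod mn 2 ≠ 0 then rt0 - mn else rt0
    let rt := if PySem.Int.mod mx 2 ≠ 0 then rt1 - mx else rt1
    let size := count_odds mn mx
    if PySem.Int.mod mn 2 ≠ 0 ∧ PySem.Int.mod mx 2 ≠ 0 then
      PySem.Int.floordiv (size * (mn + mx)) 2 - rt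
    else if ¬(PySem.Int.mod mn 2 ≠ 0 ∨ PySem.Int.mod mx 2 ≠ 0) then
      PySem.Int.floordiv (size * (mn + mx)) 2 - rt
    else if PySem.Int.mod mn 2 ≠ 0 ∧ ¬(PySem.Int.mod mx 2 ≠ 0) then
      PySem.Int.floordiv (size * (mn + mx + 1)) 2 - rt
    else
      PySem.Int.floordiv (size * (mn + mx - 1)) 2 - rt

-- ===== PORT B =====
-- g(n) = ((n+1)//2)**2 : sum of the odd numbers in [1, n], 0 for n ≤ 0 (closed form)
def oddsum_upto (n : Int) : Int := (PySem.Int.floordiv (n + 1) 2) ^ 2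

def missing_odds_alt (inputs : List Int) : Int :=
  let xs := PySem.List.sorted inputs (fun x => x) false
  ((xs.zip xs.tail).map (fun p => oddsum_upto (p.2 - 1) - oddsum_upto p.1)).sum

-- ===== PRECONDITION & SPEC =====
-- A raises IndexError on the empty list (inputs[0]).
def Pre_missing_odds (inputs : List Int) : Prop := inputs ≠ []
instance (inputs : List Int) : Decidable (Pre_missing_odds inputs) := by
  unfold Pre_missing_odds; infer_instance
def pvWitness_missing_odds : List Int := [4, 1, 8, 5]

def Spec_missing_odds (inputs : List Int) (out : Int) : Prop := out = missing_odds_alt inputs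
instance (inputs : List Int) (out : Int) : Decidable (Spec_missing_odds inputs out) := by
  unfold Spec_missing_odds; infer_instance

-- ===== CLAIM (what is proved, stated in full; the proofs are below) =====
def Claim_equal_missing_odds : Prop := ∀ (inputs : List Int), Dom_missing_odds inputs → Pre_missing_odds inputs → Spec_missing_odds inputs (missing_odds inputs)

-- ===== LEMMAS AND PROOFS =====

-- sum of the odd elements of l
def oddsum (l : List Int) : Int := (l.filter (fun x => PySem.Int.mod x 2 != 0)).sum

-- A's single fold computes (running min, running max, sum of odd elements)
lemma foldA_char (l : List Int) (mn mx rt : Int) :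
    l.foldl (fun (s : Int × Int × Int) i =>
      let a := if i < s.1 then i else s.1
      let b := if i > s.2.1 then i else s.2.1
      let c := if PySem.Int.mod i 2 ≠ 0 then s.2.2 + i else s.2.2
      (a, b, c)) (mn, mx, rt)
    = (l.foldl min mn, l.foldl max mx, rt + oddsum l) := by
  induction l generalizing mn mx rt with
  | nil => simp [oddsum]
  | cons i t ih =>
    simp only [List.foldl_cons]
    rw [ih]
    have h1 : (if i < mn then i else mn) = min mn i := by
      rw [min_def]; split_ifs <;> omega
    have h2 : (if i > mx then i else mx) = max mx i := by
      rw [max_def]; split_ifs <;> omega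
    have h3 : (if PySem.Int.mod i 2 ≠ 0 then rt + i else rt) + oddsum t
        = rt + oddsum (i :: t) := by
      unfold oddsum
      have he : i % 2 = 0 ∨ i % 2 = 1 := by omega
      rcases he with h | h <;> (simp [h]; try ring)
    simp only [h1, h2]
    rw [h3]

lemma foldl_min_le (l : List Int) (x : Int) : l.foldl min x ≤ x := by
  induction l generalizing x with
  | nil => simp
  | cons i t ih => exact le_trans (ih (min x i)) (min_le_left _ _)

lemma le_foldl_max (l : List Int) (x : Int) : x ≤ l.foldl max x := by
  induction l generalizing x with
  | nil => simp
  | cons i t ih => exact le_trans (le_max_left _ _) (ih (max x i))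

lemma foldl_min_mem (l : List Int) (x : Int) : l.foldl min x ∈ x :: l := by
  induction l generalizing x with
  | nil => simp
  | cons i t ih =>
    simp only [List.foldl_cons]
    rcases List.mem_cons.mp (ih (min x i)) with h | h
    · rcases min_cases x i with ⟨he, _⟩ | ⟨he, _⟩ <;> rw [he] at h ⊢ <;> simp [h]
    · simp [h]

lemma foldl_max_mem (l : List Int) (x : Int) : l.foldl max x ∈ x :: l := by
  induction l generalizing x with
  | nil => simp
  | cons i t ih =>
    simp only [List.foldl_cons]
    rcases List.mem_cons.mp (ih (max x i)) with h | h
    · rcases max_cases x i with ⟨he, _⟩ | ⟨he, _⟩ <;> rw [he] at h ⊢ <;> simp [h]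
    · simp [h]

lemma foldl_min_lb (l : List Int) (x : Int) : ∀ z ∈ x :: l, l.foldl min x ≤ z := by
  induction l generalizing x with
  | nil => intro z hz; simp at hz; simp [hz]
  | cons i t ih =>
    intro z hz
    simp only [List.foldl_cons]
    rcases List.mem_cons.mp hz with h | h
    · exact le_trans (le_trans (foldl_min_le t (min x i)) (min_le_left _ _)) (le_of_eq h.symm)
    · rcases List.mem_cons.mp h with h2 | h2
      · exact le_trans (le_trans (foldl_min_le t (min x i)) (min_le_right _ _)) (le_of_eq h2.symm)
      · exact ih (min x i) z (List.mem_cons_of_mem _ h2)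

lemma foldl_max_ub (l : List Int) (x : Int) : ∀ z ∈ x :: l, z ≤ l.foldl max x := by
  induction l generalizing x with
  | nil => intro z hz; simp at hz; simp [hz]
  | cons i t ih =>
    intro z hz
    simp only [List.foldl_cons]
    rcases List.mem_cons.mp hz with h | h
    · exact le_trans (le_of_eq h) (le_trans (le_max_left _ _) (le_foldl_max t (max x i)))
    · rcases List.mem_cons.mp h with h2 | h2
      · exact le_trans (le_of_eq h2) (le_trans (le_max_right _ _) (le_foldl_max t (max x i)))
      · exact ih (max x i) z (List.mem_cons_of_mem _ h2)

-- the last element of a ≤-sorted nonempty list is in it and bounds it above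
lemma last_spec (l : List Int) (hl : l ≠ []) (hp : l.Pairwise (fun a b => a ≤ b)) :
    l.getLastD 0 ∈ l ∧ ∀ z ∈ l, z ≤ l.getLastD 0 := by
  induction l with
  | nil => exact absurd rfl hl
  | cons a t ih =>
    rcases List.pairwise_cons.mp hp with ⟨hb, hpt⟩
    cases t with
    | nil => simp
    | cons c t' =>
      rcases ih (by simp) hpt with ⟨hm, hu⟩
      constructor
      · simpa using List.mem_cons_of_mem a hm
      · intro z hz
        rcases List.mem_cons.mp hz with h | h
        · subst h
          simpa [List.getLastD_cons] using hb _ hm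
        · simpa [List.getLastD_cons] using hu z h

lemma g_step (n : Int) :
    oddsum_upto n - oddsum_upto (n - 1) = if PySem.Int.mod n 2 ≠ 0 then n else 0 := by
  have h2 : (0:Int) < 2 := by norm_num
  simp only [oddsum_upto, PySem.Int.mod_eq_emod_of_pos h2, PySem.Int.floordiv_eq_ediv_of_pos h2]
  rcases Int.even_or_odd n with ⟨p, hp⟩ | ⟨p, hp⟩ <;> subst hp
  · have d1 : (p + p + 1) / 2 = p := by omega
    have d2 : (p + p - 1 + 1) / 2 = p := by omega
    rw [d1, d2, if_neg (by omega)]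
    ring
  · have d1 : (2 * p + 1 + 1) / 2 = p + 1 := by omega
    have d2 : (2 * p + 1 - 1 + 1) / 2 = p := by omega
    rw [d1, d2, if_pos (by omega)]
    ring

lemma oddsum_cons (a : Int) (t : List Int) :
    oddsum (a :: t) = (if PySem.Int.mod a 2 ≠ 0 then a else 0) + oddsum t := by
  unfold oddsum
  have he : a % 2 = 0 ∨ a % 2 = 1 := by omega
  rcases he with h | h <;> (simp [h]; try ring)

-- telescoping: the sum over adjacent pairs equals g(last) - g(head) - oddsum(tail)
lemma tele (t : List Int) (x : Int) :
    (((x :: t).zip t).map (fun p => oddsum_upto (p.2 - 1) - oddsum_upto p.1)).sum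
      = oddsum_upto ((x :: t).getLastD 0) - oddsum_upto x - oddsum t := by
  induction t generalizing x with
  | nil => simp [oddsum]
  | cons h t' ih =>
    have hz : (x :: h :: t').zip (h :: t') = (x, h) :: ((h :: t').zip t') := by
      simp [List.zip_cons_cons]
    rw [hz]
    simp only [List.map_cons, List.sum_cons]
    rw [ih h]
    have hg := g_step h
    rw [oddsum_cons h t']
    have hL : (x :: h :: t').getLastD 0 = (h :: t').getLastD 0 := by
      simp
    rw [hL]
    omega

-- the pure arithmetic core: A's parity-cased formula equals the closed form, for a ≤ b
lemma arith_core (a b S : Int) (hab : a ≤ b) :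
    (let rt1 := if PySem.Int.mod a 2 ≠ 0 then S - a else S
     let rt := if PySem.Int.mod b 2 ≠ 0 then rt1 - b else rt1
     let size := count_odds a b
     if PySem.Int.mod a 2 ≠ 0 ∧ PySem.Int.mod b 2 ≠ 0 then
       PySem.Int.floordiv (size * (a + b)) 2 - rt
     else if ¬(PySem.Int.mod a 2 ≠ 0 ∨ PySem.Int.mod b 2 ≠ 0) then
       PySem.Int.floordiv (size * (a + b)) 2 - rt
     else if PySem.Int.mod a 2 ≠ 0 ∧ ¬(PySem.Int.mod b 2 ≠ 0) then
       PySem.Int.floordiv (size * (a + b + 1)) 2 - rt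
     else
       PySem.Int.floordiv (size * (a + b - 1)) 2 - rt)
    = oddsum_upto b - oddsum_upto (a - 1) - S := by
  have h2 : (0:Int) < 2 := by norm_num
  simp only [count_odds, oddsum_upto,
    PySem.Int.mod_eq_emod_of_pos h2, PySem.Int.floordiv_eq_ediv_of_pos h2]
  rcases Int.even_or_odd a with ⟨p, hp⟩ | ⟨p, hp⟩ <;>
      rcases Int.even_or_odd b with ⟨q, hq⟩ | ⟨q, hq⟩ <;> subst hp hq
  · have ha : (p + p) % 2 = 0 := by omega
    have hb : (q + q) % 2 = 0 := by omega
    norm_num [ha, hb]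
    have d1 : (q + q - (p + p)) / 2 = q - p := by omega
    rw [d1]
    have d2 : (q - p) * (p + p + (q + q)) = 2 * ((q - p) * (p + q)) := by ring
    rw [d2, Int.mul_ediv_cancel_left _ (by norm_num : (2:Int) ≠ 0)]
    have d3 : (q + q + 1) / 2 = q := by omega
    have d4 : (p + p) / 2 = p := by omega
    rw [d3, d4]
    ring
  · have ha : (p + p) % 2 = 0 := by omega
    have hb : (2 * q + 1) % 2 = 1 := by omega
    norm_num [ha, hb]
    have d1 : (2 * q + 1 - (p + p)) / 2 = q - p := by omega
    rw [d1]
    have d2 : (q - p) * (p + p + (2 * q + 1) - 1) = 2 * ((q - p) * (p + q)) := by ring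
    rw [d2, Int.mul_ediv_cancel_left _ (by norm_num : (2:Int) ≠ 0)]
    have d3 : (2 * q + 1 + 1) / 2 = q + 1 := by omega
    have d4 : (p + p) / 2 = p := by omega
    rw [d3, d4]
    ring
  · have ha : (2 * p + 1) % 2 = 1 := by omega
    have hb : (q + q) % 2 = 0 := by omega
    norm_num [ha, hb]
    have d1 : (q + q - (2 * p + 1)) / 2 = q - p - 1 := by omega
    rw [d1]
    have d2 : (q - p - 1) * (2 * p + 1 + (q + q) + 1) = 2 * ((q - p - 1) * (p + q + 1)) := by ring
    rw [d2, Int.mul_ediv_cancel_left _ (by norm_num : (2:Int) ≠ 0)]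
    have d3 : (q + q + 1) / 2 = q := by omega
    have d4 : (2 * p + 1) / 2 = p := by omega
    rw [d3, d4]
    ring
  · have ha : (2 * p + 1) % 2 = 1 := by omega
    have hb : (2 * q + 1) % 2 = 1 := by omega
    norm_num [ha, hb]
    have d1 : (2 * q - 2 * p) / 2 = q - p := by omega
    rw [d1]
    have d2 : (q - p - 1) * (2 * p + 1 + (2 * q + 1)) = 2 * ((q - p - 1) * (p + q + 1)) := by ring
    rw [d2, Int.mul_ediv_cancel_left _ (by norm_num : (2:Int) ≠ 0)]
    have d3 : (2 * q + 1 + 1) / 2 = q + 1 := by omega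
    have d4 : (2 * p + 1) / 2 = p := by omega
    rw [d3, d4]
    ring

lemma oddsum_perm {l l' : List Int} (h : l.Perm l') : oddsum l = oddsum l' := by
  unfold oddsum
  exact (h.filter _).sum_eq

-- B's value on a nonempty list is g(max) - g(min-1) - oddsum(inputs)
lemma alt_char (x0 : Int) (t : List Int) :
    missing_odds_alt (x0 :: t)
      = oddsum_upto (t.foldl max x0) - oddsum_upto (t.foldl min x0 - 1) - oddsum (x0 :: t) := by
  obtain ⟨y, ys, hx⟩ : ∃ y ys, PySem.List.sorted (x0 :: t) (fun x => x) false = y :: ys := by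
    cases h : PySem.List.sorted (x0 :: t) (fun x => x) false with
    | nil =>
      have h0 : (x0 :: t : List Int) = [] := (PySem.List.sorted_eq_nil_iff (x0 :: t) (fun x => x) false).mp h
      simp at h0
    | cons a l => exact ⟨a, l, rfl⟩
  have hperm : (y :: ys).Perm (x0 :: t) := by
    have h := PySem.List.sorted_perm (xs := x0 :: t) (key := fun x : Int => x) (rev := false)
    rwa [hx] at h
  have hpair : (y :: ys).Pairwise (fun a b => a ≤ b) := by
    have h := PySem.List.sorted_pairwise (xs := x0 :: t) (key := fun x : Int => x)
    rw [hx] at h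
    simpa using h
  have hhead : ∀ z ∈ (x0 :: t), y ≤ z := by
    have h := PySem.List.key_head_sorted_le (x0 :: t) (fun x : Int => x) hx
    simpa using h
  rcases last_spec (y :: ys) (by simp) hpair with ⟨hLmem, hLub⟩
  have hminmem : t.foldl min x0 ∈ x0 :: t := foldl_min_mem t x0
  have hymem : y ∈ x0 :: t := hperm.mem_iff.mp (by simp)
  have hmin : t.foldl min x0 = y :=
    le_antisymm (foldl_min_lb t x0 y hymem) (hhead _ hminmem)
  have hmaxmem : t.foldl max x0 ∈ x0 :: t := foldl_max_mem t x0
  have hLmem' : (y :: ys).getLastD 0 ∈ x0 :: t := hperm.mem_iff.mp hLmem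
  have hmax : t.foldl max x0 = (y :: ys).getLastD 0 :=
    le_antisymm (hLub _ (hperm.mem_iff.mpr hmaxmem)) (foldl_max_ub t x0 _ hLmem')
  have hsum : oddsum (y :: ys) = oddsum (x0 :: t) := oddsum_perm hperm
  rw [oddsum_cons y ys] at hsum
  have hg := g_step y
  unfold missing_odds_alt
  simp only [hx, List.tail_cons]
  rw [tele ys y]
  rw [hmin, hmax]
  omega

-- ===== VERDICT (by name: the statement is the Claim_ definition above) =====
theorem missing_odds_spec : Claim_equal_missing_odds := by
  unfold Claim_equal_missing_odds
  intro inputs _ hpre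
  match inputs, hpre with
  | x0 :: t, _ =>
    unfold Spec_missing_odds missing_odds
    rw [alt_char]
    simp only [List.foldl_cons, lt_irrefl, gt_iff_lt, if_false]
    rw [foldA_char]
    have hmin : min x0 x0 = x0 := min_self x0
    have hmax : max x0 x0 = x0 := max_self x0
    have hodd : (if PySem.Int.mod x0 2 ≠ 0 then (0:Int) + x0 else 0) + oddsum t
        = oddsum (x0 :: t) := by
      unfold oddsum
      have he : x0 % 2 = 0 ∨ x0 % 2 = 1 := by omega
      rcases he with h | h <;> simp [h]
    have hab : t.foldl min x0 ≤ t.foldl max x0 :=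
      le_trans (foldl_min_le t x0) (le_foldl_max t x0)
    have := arith_core (t.foldl min x0) (t.foldl max x0) (oddsum (x0 :: t)) hab
    simp only [hmin, hmax] at *
    rw [hodd]
    exact this
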